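-- pv_equiv track=rewrite | github.com/jamestomasino/dotfiles-minimal | bin/har_getter.py | domain_variants
-- ===== SOURCE A (Python) =====
-- def domain_variants(host):
--     parts = (host or "").split(".")
--     out = set()
--     for i in range(len(parts)-1):
--         d = "." + ".".join(parts[i:])
--         out.add(d)
--         out.add(d.lstrip("."))
--     out.add(host or "")
--     return out
-- ===== SOURCE B (Python) =====
-- def domain_variants(host):
--     h = host or ""
--     parts = h.split(".")
--     # suffix chain built once from the right: sufs[i] == ".".join(parts[i:])
--     sufs = [parts[-1]]
--     for p in reversed(parts[:-1]):
--         sufs.append(p + "." + sufs[-1])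
--     sufs.reverse()
--     out = set()
--     for s in sufs[:-1]:
--         d = "." + s
--         out.add(d)
--         out.add(d.lstrip("."))
--     out.add(h)
--     return out
-- ===== Notes on version B (the rewrite author's own statement) =====
-- stated objective: faster
-- what changed: A re-joins parts[i:] from scratch on every loop iteration; B builds all suffix strings once as a right-to-left chain (each suffix extends the previous by one label) and then makes a single forward pass over them.
import Mathlib
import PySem

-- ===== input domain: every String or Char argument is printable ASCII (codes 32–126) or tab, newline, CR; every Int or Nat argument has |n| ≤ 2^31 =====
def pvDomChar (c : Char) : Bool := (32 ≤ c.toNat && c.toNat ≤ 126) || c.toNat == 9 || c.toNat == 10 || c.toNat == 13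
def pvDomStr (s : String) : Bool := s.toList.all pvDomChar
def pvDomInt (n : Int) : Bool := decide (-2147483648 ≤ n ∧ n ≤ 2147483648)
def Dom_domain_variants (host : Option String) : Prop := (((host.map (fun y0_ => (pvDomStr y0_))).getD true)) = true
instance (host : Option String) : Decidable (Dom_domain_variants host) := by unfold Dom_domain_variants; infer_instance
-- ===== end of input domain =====

-- B replaces A's per-iteration `".".join(parts[i:])` rescan by a suffix chain built once from
-- the right, then one forward pass over the precomputed suffixes.

-- hand port of s.lstrip(".") (PySem has no one-sided strip with a chars argument):
-- drop every leading '.'; exact, since lstrip removes ALL leading occurrences.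
def lstripDots (s : String) : String := String.ofList (s.toList.dropWhile (· == '.'))

-- ===== PORT A =====
def domain_variants (host : Option String) : List String :=
  let h := host.getD ""                                   -- `host or ""` (empty string is falsy → "")
  let parts := (PySem.Str.split? h ".").getD []           -- sep ≠ "" so never none
  let out : PySem.Set String :=
    (PySem.List.pyRange 0 ((parts.length : Int) - 1) 1).foldl
      (fun out i =>
        let d := "." ++ PySem.Str.join "." (PySem.List.slice parts (some i) none)
        PySem.Set.add (PySem.Set.add out d) (lstripDots d))
      PySem.Set.empty
  PySem.Set.add out h

-- ===== PORT B =====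
def domain_variants_alt (host : Option String) : List String :=
  let h := host.getD ""
  let parts := (PySem.Str.split? h ".").getD []
  -- sufs = [parts[-1]]; for p in reversed(parts[:-1]): sufs.append(p + "." + sufs[-1])
  let sufs :=
    ((PySem.List.slice parts none (some (-1))).reverse).foldl
      (fun sufs p => sufs ++ [p ++ "." ++ (PySem.List.pyGet? sufs (-1)).getD ""])
      [(PySem.List.pyGet? parts (-1)).getD ""]
  let sufs := sufs.reverse
  let out : PySem.Set String :=
    (PySem.List.slice sufs none (some (-1))).foldl
      (fun out s =>
        let d := "." ++ s
        PySem.Set.add (PySem.Set.add out d) (lstripDots d))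
      PySem.Set.empty
  PySem.Set.add out h

-- ===== PRECONDITION & SPEC =====
def Spec_domain_variants (host : Option String) (out : List String) : Prop := out = domain_variants_alt host
instance (host : Option String) (out : List String) : Decidable (Spec_domain_variants host out) := by unfold Spec_domain_variants; infer_instance

-- ===== CLAIM (what is proved, stated in full; the proofs are below) =====
def Claim_equal_domain_variants : Prop := ∀ (host : Option String), Dom_domain_variants host → Spec_domain_variants host (domain_variants host)

-- ===== LEMMAS AND PROOFS =====

-- the suffix strings B chains up, in the order B appends them
def pvChain (l : List String) (t : String) : List String :=
  match l with
  | [] => []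
  | p :: l => (p ++ "." ++ t) :: pvChain l (p ++ "." ++ t)

lemma pvChain_append (xs ys : List String) (t : String) :
    pvChain (xs ++ ys) t = pvChain xs t ++ pvChain ys ((pvChain xs t).getLastD t) := by
  induction xs generalizing t with
  | nil => simp [pvChain]
  | cons p xs ih =>
      simp only [List.cons_append, pvChain, ih]
      congr 2
      cases pvChain xs (p ++ "." ++ t) with
      | nil => simp
      | cons hd tl => simp [List.getLast?_cons]

lemma pyGet_neg_one {α : Type} (xs : List α) (h : xs ≠ []) (d : α) :
    (PySem.List.pyGet? xs (-1)).getD d = xs.getLast h := by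
  have hlen : 0 < xs.length := List.length_pos_of_ne_nil h
  simp [PySem.List.pyGet?, PySem.List.pyIdx?]
  rw [if_pos (by omega : 1 ≤ xs.length)]
  simp [List.getElem?_eq_getElem (by omega : xs.length - 1 < xs.length), List.getLast_eq_getElem]

-- B's accumulation loop produces acc ++ pvChain l (last acc)
lemma fold_eq_chain (l acc : List String) (h : acc ≠ []) :
    l.foldl (fun sufs p => sufs ++ [p ++ "." ++ (PySem.List.pyGet? sufs (-1)).getD ""]) acc
      = acc ++ pvChain l (acc.getLast h) := by
  induction l generalizing acc with
  | nil => simp [pvChain]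
  | cons p l ih =>
      simp only [List.foldl_cons, pvChain]
      rw [pyGet_neg_one acc h, ih (acc ++ [p ++ "." ++ acc.getLast h]) (by simp)]
      simp

lemma strJoin_cons (a : String) (ps : List String) (h : ps ≠ []) :
    PySem.Str.join "." (a :: ps) = a ++ "." ++ PySem.Str.join "." ps := by
  obtain ⟨b, rest, rfl⟩ := List.exists_cons_of_ne_nil h
  simp [PySem.Str.join, PySem.Chars.join_cons_cons]
  rw [← String.toList_inj]; simp

-- the chained suffixes, reversed behind the seed, are exactly the joins of the tails
lemma sufs_spec (parts : List String) (h : parts ≠ []) :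
    ((parts.getLast h) :: pvChain parts.dropLast.reverse (parts.getLast h)).reverse
      = (List.range parts.length).map (fun i => PySem.Str.join "." (parts.drop i)) := by
  induction parts with
  | nil => exact absurd rfl h
  | cons a parts ih =>
      rcases eq_or_ne parts [] with rfl | hp
      · simp [pvChain, PySem.Str.join, PySem.Chars.join, List.intercalate]
      · have hn : 0 < parts.length := List.length_pos_of_ne_nil hp
        have hlast : (a :: parts).getLast h = parts.getLast hp := List.getLast_cons hp
        have hdrop : (a :: parts).dropLast = a :: parts.dropLast := List.dropLast_cons_of_ne_nil hp
        set s := parts.getLast hp with hs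
        set C := pvChain parts.dropLast.reverse s with hC
        have IH := ih hp
        -- last element of the chain is the full join of parts
        have hlastC : C.getLastD s = PySem.Str.join "." parts := by
          have h1 := congrArg List.head? IH
          rw [List.head?_reverse, List.getLast?_cons] at h1
          obtain ⟨m, hm⟩ : ∃ m, parts.length = m + 1 := ⟨parts.length - 1, by omega⟩
          rw [hm, List.range_succ_eq_map] at h1
          simpa using h1
        rw [hlast, hdrop]
        simp only [List.reverse_cons]
        rw [pvChain_append]
        simp only [pvChain]
        rw [← hC, hlastC]
        have hstep : List.map (fun i => PySem.Str.join "." (List.drop i (a :: parts))) (List.range (a :: parts).length)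
            = (a ++ "." ++ PySem.Str.join "." parts) :: List.map (fun i => PySem.Str.join "." (List.drop i parts)) (List.range parts.length) := by
          rw [List.length_cons, List.range_succ_eq_map, List.map_cons, List.map_map]
          simp [Function.comp, List.drop_succ_cons, strJoin_cons a parts hp]
        rw [hstep, ← IH]
        rw [← hs, ← hC]
        simp

theorem domain_variants_spec : Claim_equal_domain_variants := by
  intro host _
  unfold Spec_domain_variants domain_variants domain_variants_alt
  dsimp only
  generalize ((PySem.Str.split? (host.getD "") ".").getD []) = parts
  rcases parts with _ | ⟨a, ps⟩
  · simp [PySem.List.slice_to_neg_one, PySem.List.pyGet?,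
      PySem.List.pyIdx?, PySem.Set.empty]
  · have hne : a :: ps ≠ [] := by simp
    rw [PySem.List.slice_to_neg_one, pyGet_neg_one (a :: ps) hne ""]
    rw [fold_eq_chain _ _ (by simp : ([(a :: ps).getLast hne] : List String) ≠ [])]
    simp only [PySem.List.slice_to_neg_one, List.getLast_singleton, List.singleton_append]
    rw [sufs_spec (a :: ps) hne]
    simp only [List.length_cons, List.range_succ, List.map_append, List.map_cons, List.map_nil, List.dropLast_concat]
    rw [List.foldl_map]
    have hcast : (((ps.length + 1 : Nat) : Int)) - 1 = (ps.length : Int) := by push_cast; ring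
    rw [hcast, PySem.List.pyRange_zero]
    simp only [Int.toNat_natCast]
    rw [List.foldl_map]
    rw [PySem.List.foldl_congr_mem _ _
      (fun out (k : Nat) =>
        ((out.add ("." ++ PySem.Str.join "." (List.drop k (a :: ps)))).add
          (lstripDots ("." ++ PySem.Str.join "." (List.drop k (a :: ps))))) : _)
      PySem.Set.empty
      (by
        intro acc k _
        rw [PySem.List.slice_from _ (Int.natCast_nonneg k)]
        simp)]
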